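-- pv_equiv track=rewrite | github.com/luisfmgoncalves/adventOfCode2020 | day12/day12.py | move_ship_part_2
-- ===== SOURCE A (Python) =====
-- def move_ship_part_2(action, units, facing, waypoint, ship):
--     if action == "N": waypoint["N"] += units
--     elif action == "S": waypoint["N"] -= units
--     elif action == "E": waypoint["E"] += units
--     elif action == "W": waypoint["E"] -= units
--     elif action == 'F':
--         for x in range(units):
--             if facing == 'N':
--                 ship["E"] -= waypoint["N"]
--                 ship["N"] -= waypoint["E"]
--             if facing == 'S':
--                 ship["E"] += waypoint["N"]
--                 ship["N"] += waypoint["E"]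
--             if facing == 'E':
--                 ship["E"] += waypoint["E"]
--                 ship["N"] += waypoint["N"]
--             if facing == 'W':
--                 ship["E"] -= waypoint["E"]
--                 ship["N"] -= waypoint["N"]
--     elif action == 'L':
--         if units == 90:
--             waypoint["E"], waypoint["N"] = -waypoint["N"], waypoint["E"]
--         elif units == 270:
--             waypoint["E"], waypoint["N"] = waypoint["N"], -waypoint["E"]
--         elif units == 180:
--             waypoint["E"] = -waypoint["E"]
--             waypoint["N"] = -waypoint["N"]
--     elif action == 'R':
--         if units == 90:
--             waypoint["E"], waypoint["N"] = waypoint["N"], -waypoint["E"]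
--         elif units == 270:
--             waypoint["E"], waypoint["N"] = -waypoint["N"], waypoint["E"]
--         elif units == 180:
--             waypoint["E"] = -waypoint["E"]
--             waypoint["N"] = -waypoint["N"]
--     return waypoint, ship
-- ===== SOURCE B (Python) =====
-- # Same navigation step, but table-driven and closed-form: the per-unit 'F' loop
-- # becomes a single multiply (ship += units * delta) and the L/R elif chains become
-- # a quarter-turn count.  Mutates waypoint/ship in place like the original.
-- _AXIS = {"N": ("N", 1), "S": ("N", -1), "E": ("E", 1), "W": ("E", -1)}
-- _SIGN = {"N": -1, "S": 1, "E": 1, "W": -1}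
-- _LEFT_TURNS = {90: 1, 180: 2, 270: 3}
--
--
-- def move_ship_part_2(action, units, facing, waypoint, ship):
--     if action in _AXIS:
--         axis, sign = _AXIS[action]
--         waypoint[axis] += sign * units
--     elif action == "F" and facing in _SIGN and units > 0:
--         s = _SIGN[facing]
--         swap = facing in ("N", "S")
--         de = s * (waypoint["N"] if swap else waypoint["E"])
--         dn = s * (waypoint["E"] if swap else waypoint["N"])
--         ship["E"] += units * de
--         ship["N"] += units * dn
--     elif action in ("L", "R"):
--         q = _LEFT_TURNS.get(units)
--         if q is not None:
--             if action == "R":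
--                 q = 4 - q
--             e, n = waypoint["E"], waypoint["N"]
--             if q == 1:
--                 waypoint["E"], waypoint["N"] = -n, e
--             elif q == 2:
--                 waypoint["E"], waypoint["N"] = -e, -n
--             else:
--                 waypoint["E"], waypoint["N"] = n, -e
--     return waypoint, ship
-- ===== Notes on version B (the rewrite author's own statement) =====
-- stated objective: alternative
-- what changed: Replaces the per-unit 'F' loop by a single closed-form multiply (ship += units*delta) and the elif chains by lookup tables (axis/sign table, quarter-turn count for L/R).
import Mathlib
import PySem

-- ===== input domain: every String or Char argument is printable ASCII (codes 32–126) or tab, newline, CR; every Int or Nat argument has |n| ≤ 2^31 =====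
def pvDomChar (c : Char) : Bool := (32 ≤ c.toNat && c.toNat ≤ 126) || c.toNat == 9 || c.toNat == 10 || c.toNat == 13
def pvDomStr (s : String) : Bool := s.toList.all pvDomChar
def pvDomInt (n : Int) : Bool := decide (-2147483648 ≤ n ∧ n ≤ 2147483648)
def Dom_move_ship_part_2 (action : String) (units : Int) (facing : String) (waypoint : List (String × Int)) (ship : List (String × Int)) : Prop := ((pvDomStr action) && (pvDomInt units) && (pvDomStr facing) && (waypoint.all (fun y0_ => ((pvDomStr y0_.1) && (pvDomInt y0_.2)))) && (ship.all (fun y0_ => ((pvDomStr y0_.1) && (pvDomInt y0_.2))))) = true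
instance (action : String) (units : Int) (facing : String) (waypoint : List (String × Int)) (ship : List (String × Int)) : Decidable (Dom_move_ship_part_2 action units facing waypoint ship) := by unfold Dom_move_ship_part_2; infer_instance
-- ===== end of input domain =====

-- B replaces A's per-unit 'F' loop by one closed-form multiply (ship += units*delta)
-- and A's elif chains by lookup tables (objective: alternative).  Both Pythons
-- mutate waypoint/ship in place the same way; the theorem is about the RETURN value.

-- ===== PORT A =====
-- `d[k] = f(d[k])`: where Python raises KeyError (key absent) the port leaves d
-- unchanged; Pre_ excludes exactly those inputs.
def aUpd (d : PySem.Dict String Int) (k : String) (f : Int → Int) : PySem.Dict String Int :=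
  match d.get? k with
  | some v => d.insert k (f v)
  | none => d

-- `d[k]`: default 0 where Python raises KeyError; Pre_ excludes those inputs.
def aGet (d : PySem.Dict String Int) (k : String) : Int := d.getD k 0

def move_ship_part_2 (action : String) (units : Int) (facing : String)
    (waypoint : List (String × Int)) (ship : List (String × Int)) :
    (List (String × Int)) × (List (String × Int)) :=
  let wp : PySem.Dict String Int := PySem.Dict.mk waypoint
  let sh : PySem.Dict String Int := PySem.Dict.mk ship
  let st : PySem.Dict String Int × PySem.Dict String Int :=
    if action = "N" then (aUpd wp "N" (· + units), sh)
    else if action = "S" then (aUpd wp "N" (· - units), sh)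
    else if action = "E" then (aUpd wp "E" (· + units), sh)
    else if action = "W" then (aUpd wp "E" (· - units), sh)
    else if action = "F" then
      (wp, (PySem.List.pyRange 0 units 1).foldl (fun sh _ =>
        let sh := if facing = "N" then aUpd (aUpd sh "E" (· - aGet wp "N")) "N" (· - aGet wp "E") else sh
        let sh := if facing = "S" then aUpd (aUpd sh "E" (· + aGet wp "N")) "N" (· + aGet wp "E") else sh
        let sh := if facing = "E" then aUpd (aUpd sh "E" (· + aGet wp "E")) "N" (· + aGet wp "N") else sh
        let sh := if facing = "W" then aUpd (aUpd sh "E" (· - aGet wp "E")) "N" (· - aGet wp "N") else sh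
        sh) sh)
    else if action = "L" then
      (if units = 90 then (wp.insert "E" (-(aGet wp "N"))).insert "N" (aGet wp "E")
       else if units = 270 then (wp.insert "E" (aGet wp "N")).insert "N" (-(aGet wp "E"))
       else if units = 180 then aUpd (aUpd wp "E" (fun v => -v)) "N" (fun v => -v)
       else wp, sh)
    else if action = "R" then
      (if units = 90 then (wp.insert "E" (aGet wp "N")).insert "N" (-(aGet wp "E"))
       else if units = 270 then (wp.insert "E" (-(aGet wp "N"))).insert "N" (aGet wp "E")
       else if units = 180 then aUpd (aUpd wp "E" (fun v => -v)) "N" (fun v => -v)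
       else wp, sh)
    else (wp, sh)
  (st.1.items, st.2.items)

-- ===== PORT B =====
-- `d[k] += x`: no-op where Python raises KeyError; Pre_ excludes those inputs.
def bAdd (d : PySem.Dict String Int) (k : String) (x : Int) : PySem.Dict String Int :=
  match d.get? k with
  | some v => d.insert k (v + x)
  | none => d

-- `d[k]`: default 0 where Python raises KeyError; Pre_ excludes those inputs.
def bGet (d : PySem.Dict String Int) (k : String) : Int := d.getD k 0

def bAxis : PySem.Dict String (String × Int) :=
  PySem.Dict.mk [("N", ("N", 1)), ("S", ("N", -1)), ("E", ("E", 1)), ("W", ("E", -1))]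
def bSign : PySem.Dict String Int := PySem.Dict.mk [("N", -1), ("S", 1), ("E", 1), ("W", -1)]
def bLeftTurns : PySem.Dict Int Int := PySem.Dict.mk [(90, 1), (180, 2), (270, 3)]

def move_ship_part_2_alt (action : String) (units : Int) (facing : String)
    (waypoint : List (String × Int)) (ship : List (String × Int)) :
    (List (String × Int)) × (List (String × Int)) :=
  let wp : PySem.Dict String Int := PySem.Dict.mk waypoint
  let sh : PySem.Dict String Int := PySem.Dict.mk ship
  let st : PySem.Dict String Int × PySem.Dict String Int :=
    match bAxis.get? action with
    | some (axis, sign) => (bAdd wp axis (sign * units), sh)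
    | none =>
      if (action == "F") && bSign.contains facing && decide (0 < units) then
        let s := bSign.getD facing 0
        let swap := facing == "N" || facing == "S"
        let de := s * (if swap then bGet wp "N" else bGet wp "E")
        let dn := s * (if swap then bGet wp "E" else bGet wp "N")
        (wp, bAdd (bAdd sh "E" (units * de)) "N" (units * dn))
      else if (action == "L") || (action == "R") then
        match bLeftTurns.get? units with
        | none => (wp, sh)
        | some q0 =>
          let q := if action == "R" then 4 - q0 else q0
          let e := bGet wp "E"
          let n := bGet wp "N"
          if q = 1 then ((wp.insert "E" (-n)).insert "N" e, sh)
          else if q = 2 then ((wp.insert "E" (-e)).insert "N" (-n), sh)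
          else ((wp.insert "E" n).insert "N" (-e), sh)
      else (wp, sh)
  (st.1.items, st.2.items)

-- ===== PRECONDITION & SPEC =====
-- Pre_ excludes (a) association lists with a repeated key — those do not encode a
-- Python dict — and (b) exactly the inputs on which A raises KeyError, i.e. a key
-- that the executed branch reads ("N"/"E" of waypoint, and of ship for a positive
-- 'F' move with a valid facing) is absent.  (Implications are written !p || q.)
def Pre_move_ship_part_2 (action : String) (units : Int) (facing : String)
    (waypoint : List (String × Int)) (ship : List (String × Int)) : Prop :=
  (decide (waypoint.map Prod.fst).Nodup &&
   decide (ship.map Prod.fst).Nodup &&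
   (!(action == "N" || action == "S") || (waypoint.map Prod.fst).contains "N") &&
   (!(action == "E" || action == "W") || (waypoint.map Prod.fst).contains "E") &&
   (!((action == "F") && decide (1 ≤ units) &&
        (facing == "N" || facing == "S" || facing == "E" || facing == "W")) ||
      ((waypoint.map Prod.fst).contains "N" && (waypoint.map Prod.fst).contains "E" &&
       (ship.map Prod.fst).contains "N" && (ship.map Prod.fst).contains "E")) &&
   (!((action == "L" || action == "R") && (units == 90 || units == 180 || units == 270)) ||
      ((waypoint.map Prod.fst).contains "N" && (waypoint.map Prod.fst).contains "E"))) = true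

instance (action : String) (units : Int) (facing : String) (waypoint : List (String × Int)) (ship : List (String × Int)) : Decidable (Pre_move_ship_part_2 action units facing waypoint ship) := by unfold Pre_move_ship_part_2; infer_instance

def pvWitness_move_ship_part_2 : String × Int × String × (List (String × Int)) × (List (String × Int)) :=
  ("F", 2, "E", [("E", 10), ("N", 4)], [("E", 0), ("N", 0)])

def Spec_move_ship_part_2 (action : String) (units : Int) (facing : String) (waypoint : List (String × Int)) (ship : List (String × Int)) (out : (List (String × Int)) × (List (String × Int))) : Prop := out = move_ship_part_2_alt action units facing waypoint ship
instance (action : String) (units : Int) (facing : String) (waypoint : List (String × Int)) (ship : List (String × Int)) (out : (List (String × Int)) × (List (String × Int))) : Decidable (Spec_move_ship_part_2 action units facing waypoint ship out) := by unfold Spec_move_ship_part_2; infer_instance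

-- ===== CLAIM (what is proved, stated in full; the proofs are below) =====
def Claim_equal_move_ship_part_2 : Prop := ∀ (action : String) (units : Int) (facing : String) (waypoint : List (String × Int)) (ship : List (String × Int)), Dom_move_ship_part_2 action units facing waypoint ship → Pre_move_ship_part_2 action units facing waypoint ship → Spec_move_ship_part_2 action units facing waypoint ship (move_ship_part_2 action units facing waypoint ship)

-- ===== LEMMAS AND PROOFS =====

theorem contains_eq_false_forall (d : PySem.Dict String Int) (k : String)
    (h : d.contains k = false) : ∀ p ∈ d.items, (p.1 == k) = false := by
  intro p hp
  simp only [PySem.Dict.contains, List.any_eq_false] at h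
  simpa using h p hp

theorem insert_insert_self (d : PySem.Dict String Int) (k : String) (v w : Int) :
    (d.insert k v).insert k w = d.insert k w := by
  apply PySem.Dict.ext
  have hc : (d.insert k v).contains k = true := PySem.Dict.contains_insert_self d k v
  by_cases h : d.contains k = true
  · rw [PySem.Dict.items_insert_of_contains _ _ hc, PySem.Dict.items_insert_of_contains _ _ h,
      PySem.Dict.items_insert_of_contains _ _ h, List.map_map]
    refine List.map_congr_left (fun p hp => ?_)
    by_cases hk : p.1 = k <;> simp [hk]
  · rw [Bool.not_eq_true] at h
    rw [PySem.Dict.items_insert_of_contains _ _ hc, PySem.Dict.items_insert_of_not_contains _ _ h,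
      PySem.Dict.items_insert_of_not_contains _ _ h, List.map_append]
    have hall := contains_eq_false_forall d k h
    rw [List.map_congr_left (g := id) (fun p hp => by simp [hall p hp])]
    simp

theorem insert_comm_of_ne (d : PySem.Dict String Int) {k k' : String} (hne : k ≠ k')
    (hk' : d.contains k' = true) (v w : Int) :
    (d.insert k v).insert k' w = (d.insert k' w).insert k v := by
  apply PySem.Dict.ext
  have c1 : (d.insert k v).contains k' = d.contains k' := by
    rw [PySem.Dict.contains_insert]; simp [Ne.symm hne]
  have c2 : (d.insert k' w).contains k = d.contains k := by
    rw [PySem.Dict.contains_insert]; simp [hne]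
  by_cases h : d.contains k = true
  · rw [PySem.Dict.items_insert_of_contains _ _ (c1.trans hk'),
      PySem.Dict.items_insert_of_contains _ _ h,
      PySem.Dict.items_insert_of_contains _ _ (c2.trans h),
      PySem.Dict.items_insert_of_contains _ _ hk', List.map_map, List.map_map]
    refine List.map_congr_left (fun p hp => ?_)
    by_cases hk : p.1 = k <;> by_cases hk' : p.1 = k' <;>
      simp [hk, hk', hne, Ne.symm hne]
  · rw [Bool.not_eq_true] at h
    rw [PySem.Dict.items_insert_of_contains _ _ (c1.trans hk'),
      PySem.Dict.items_insert_of_not_contains _ _ h,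
      PySem.Dict.items_insert_of_not_contains _ _ (c2.trans h),
      PySem.Dict.items_insert_of_contains _ _ hk', List.map_append]
    congr 1
    simp [hne]

theorem aUpd_of_get? {d : PySem.Dict String Int} {k : String} {v : Int} (f : Int → Int)
    (h : d.get? k = some v) : aUpd d k f = d.insert k (f v) := by
  unfold aUpd; rw [h]

theorem bAdd_of_get? {d : PySem.Dict String Int} {k : String} {v : Int} (x : Int)
    (h : d.get? k = some v) : bAdd d k x = d.insert k (v + x) := by
  unfold bAdd; rw [h]

-- a key listed by the input association list is found by get?
theorem get?_of_contains_fst (d : List (String × Int)) (k : String)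
    (h : (d.map Prod.fst).contains k = true) :
    ∃ v, (PySem.Dict.mk d).get? k = some v := by
  rcases Option.eq_none_or_eq_some ((PySem.Dict.mk d).get? k) with h0 | hv
  · rw [PySem.Dict.get?_eq_none_iff_not_mem_keys] at h0
    exact absurd (by simpa [PySem.Dict.keys] using h) h0
  · exact hv

-- A's 'F' loop on a nonempty list multiplies out to two inserts
theorem foldl_bump (de dn : Int) :
    ∀ (l : List Int) (d : PySem.Dict String Int) (e n : Int), l ≠ [] →
      d.get? "E" = some e → d.get? "N" = some n →
      l.foldl (fun sh _ => aUpd (aUpd sh "E" (· + de)) "N" (· + dn)) d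
        = (d.insert "E" (e + l.length * de)).insert "N" (n + l.length * dn) := by
  intro l
  induction l with
  | nil => intro d e n h; exact absurd rfl h
  | cons x t ih =>
    intro d e n _ hE hN
    have hne : ("N" : String) ≠ "E" := by decide
    have step : (aUpd (aUpd d "E" (· + de)) "N" (· + dn))
        = (d.insert "E" (e + de)).insert "N" (n + dn) := by
      rw [aUpd_of_get? _ hE, aUpd_of_get? _ (by
        rw [PySem.Dict.get?_insert_of_ne _ _ hne]; exact hN)]
    rcases eq_or_ne t [] with ht | ht
    · subst ht
      simp only [List.foldl_cons, List.foldl_nil, step, List.length_cons, List.length_nil]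
      norm_num
    · have hE' : ((d.insert "E" (e + de)).insert "N" (n + dn)).get? "E" = some (e + de) := by
        rw [PySem.Dict.get?_insert_of_ne _ _ hne.symm, PySem.Dict.get?_insert_self]
      have hN' : ((d.insert "E" (e + de)).insert "N" (n + dn)).get? "N" = some (n + dn) := by
        rw [PySem.Dict.get?_insert_self]
      have := ih ((d.insert "E" (e + de)).insert "N" (n + dn)) (e + de) (n + dn) ht hE' hN'
      simp only [List.foldl_cons, step, this]
      rw [insert_comm_of_ne (d.insert "E" (e + de)) hne
        (PySem.Dict.contains_insert_self d "E" (e + de)) (n + dn) (e + de + ↑t.length * de),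
        insert_insert_self, insert_insert_self]
      have hA : e + de + (t.length : Int) * de = e + ((x :: t).length : Int) * de := by
        simp only [List.length_cons]; push_cast; ring
      have hB : n + dn + (t.length : Int) * dn = n + ((x :: t).length : Int) * dn := by
        simp only [List.length_cons]; push_cast; ring
      rw [hA, hB]

-- the "F" equivalence for one concrete facing, stated on the read values
theorem case_F (units : Int) (hu : 1 ≤ units) (sh : PySem.Dict String Int)
    (de dn e n : Int) (hE : sh.get? "E" = some e) (hN : sh.get? "N" = some n) :
    (PySem.List.pyRange 0 units 1).foldl
        (fun sh _ => aUpd (aUpd sh "E" (· + de)) "N" (· + dn)) sh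
      = bAdd (bAdd sh "E" (units * de)) "N" (units * dn) := by
  have hne : ("N" : String) ≠ "E" := by decide
  have hnil : PySem.List.pyRange 0 units 1 ≠ [] := by
    rw [PySem.List.pyRange_one_cons (by omega)]; simp
  rw [foldl_bump de dn _ sh e n hnil hE hN,
    bAdd_of_get? _ hE, bAdd_of_get? (units * dn) (by
      rw [PySem.Dict.get?_insert_of_ne _ _ hne]; exact hN)]
  have hlen : (((PySem.List.pyRange 0 units 1).length : Int)) = units := by
    rw [PySem.List.length_pyRange_one]; omega
  rw [hlen]

-- ===== VERDICT (by name: the statement is the Claim_ definition above) =====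
theorem move_ship_part_2_spec : Claim_equal_move_ship_part_2 := by
  intro action units facing waypoint ship _ hpre
  unfold Pre_move_ship_part_2 at hpre
  simp only [Bool.and_eq_true, Bool.or_eq_true, Bool.not_eq_true', Bool.or_eq_false_iff,
    beq_eq_false_iff_ne, decide_eq_true_eq, beq_iff_eq] at hpre
  obtain ⟨⟨⟨⟨⟨-, -⟩, hNS⟩, hEW⟩, hF⟩, hLR⟩ := hpre
  show _ = move_ship_part_2_alt action units facing waypoint ship
  by_cases hNa : action = "N"
  · subst hNa
    obtain ⟨v, hv⟩ := get?_of_contains_fst waypoint "N"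
      (hNS.resolve_left (by simp))
    simp only [move_ship_part_2, move_ship_part_2_alt, bAxis, PySem.Dict.get?_mk_cons]
    simp only [if_pos rfl, BEq.rfl, if_true]
    simp [aUpd_of_get? _ hv, bAdd_of_get? _ hv]
  · by_cases hSa : action = "S"
    · subst hSa
      obtain ⟨v, hv⟩ := get?_of_contains_fst waypoint "N" (hNS.resolve_left (by simp))
      simp only [move_ship_part_2, move_ship_part_2_alt, bAxis, PySem.Dict.get?_mk_cons]
      simp [aUpd_of_get? _ hv, bAdd_of_get? _ hv, sub_eq_add_neg]
    · by_cases hEa : action = "E"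
      · subst hEa
        obtain ⟨v, hv⟩ := get?_of_contains_fst waypoint "E" (hEW.resolve_left (by simp))
        simp only [move_ship_part_2, move_ship_part_2_alt, bAxis, PySem.Dict.get?_mk_cons]
        simp [aUpd_of_get? _ hv, bAdd_of_get? _ hv]
      · by_cases hWa : action = "W"
        · subst hWa
          obtain ⟨v, hv⟩ := get?_of_contains_fst waypoint "E" (hEW.resolve_left (by simp))
          simp only [move_ship_part_2, move_ship_part_2_alt, bAxis, PySem.Dict.get?_mk_cons]
          simp [aUpd_of_get? _ hv, bAdd_of_get? _ hv, sub_eq_add_neg]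
        · by_cases hFa : action = "F"
          · subst hFa
            have hax : bAxis.get? "F" = none := by decide
            by_cases hu : 1 ≤ units
            · by_cases hfac : facing = "N" ∨ facing = "S" ∨ facing = "E" ∨ facing = "W"
              · have hside : ("F" == "F" && decide (1 ≤ units) &&
                    (facing == "N" || facing == "S" || facing == "E" || facing == "W")) = true := by
                  simp only [Bool.and_eq_true, Bool.or_eq_true, decide_eq_true_eq, beq_iff_eq]
                  exact ⟨⟨trivial, hu⟩, by rcases hfac with h | h | h | h <;> simp [h]⟩
                obtain ⟨⟨⟨hwN, hwE⟩, hsN⟩, hsE⟩ := hF.resolve_left (by simp only [hside]; simp)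
                obtain ⟨wn, hwn⟩ := get?_of_contains_fst waypoint "N" hwN
                obtain ⟨we, hwe⟩ := get?_of_contains_fst waypoint "E" hwE
                obtain ⟨sn, hsn⟩ := get?_of_contains_fst ship "N" hsN
                obtain ⟨se, hse⟩ := get?_of_contains_fst ship "E" hsE
                have hgwn : aGet (PySem.Dict.mk waypoint) "N" = wn := PySem.Dict.getD_of_get?_eq_some _ 0 hwn
                have hgwe : aGet (PySem.Dict.mk waypoint) "E" = we := PySem.Dict.getD_of_get?_eq_some _ 0 hwe
                have hbwn : bGet (PySem.Dict.mk waypoint) "N" = wn := hgwn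
                have hbwe : bGet (PySem.Dict.mk waypoint) "E" = we := hgwe
                have hu' : (0 : Int) < units := by omega
                have hd0 : decide ((0:Int) < units) = true := decide_eq_true hu'
                rcases hfac with hf | hf | hf | hf <;> subst hf
                · have key := case_F units hu (PySem.Dict.mk ship) (-wn) (-we) se sn hse hsn
                  simp [move_ship_part_2, move_ship_part_2_alt, hax, bSign, hgwn, hgwe,
                    hbwn, hbwe, sub_eq_add_neg, hd0, key, PySem.Dict.getD_eq_get?_getD,
                    PySem.Dict.get?_mk_cons, mul_neg, neg_mul]
                · have key := case_F units hu (PySem.Dict.mk ship) wn we se sn hse hsn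
                  simp [move_ship_part_2, move_ship_part_2_alt, hax, bSign, hgwn, hgwe,
                    hbwn, hbwe, hd0, key, PySem.Dict.getD_eq_get?_getD,
                    PySem.Dict.get?_mk_cons, mul_neg, neg_mul]
                · have key := case_F units hu (PySem.Dict.mk ship) we wn se sn hse hsn
                  simp [move_ship_part_2, move_ship_part_2_alt, hax, bSign, hgwn, hgwe,
                    hbwn, hbwe, hd0, key, PySem.Dict.getD_eq_get?_getD,
                    PySem.Dict.get?_mk_cons, mul_neg, neg_mul]
                · have key := case_F units hu (PySem.Dict.mk ship) (-we) (-wn) se sn hse hsn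
                  simp [move_ship_part_2, move_ship_part_2_alt, hax, bSign, hgwn, hgwe,
                    hbwn, hbwe, sub_eq_add_neg, hd0, key, PySem.Dict.getD_eq_get?_getD,
                    PySem.Dict.get?_mk_cons, mul_neg, neg_mul]
              · push_neg at hfac
                obtain ⟨h1, h2, h3, h4⟩ := hfac
                have hcf : bSign.contains facing = false := by
                  simp [bSign, PySem.Dict.contains_mk, Ne.symm h1, Ne.symm h2, Ne.symm h3,
                    Ne.symm h4]
                simp [move_ship_part_2, move_ship_part_2_alt, hax, hcf, h1, h2, h3, h4,
                  PySem.List.foldl_ignore]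
            · simp [move_ship_part_2, move_ship_part_2_alt, hax,
                PySem.List.pyRange_one_eq_nil (by omega : units ≤ 0),
                decide_eq_false (by omega : ¬ (0:Int) < units)]
          · by_cases hLa : action = "L"
            · subst hLa
              have hax2 : bAxis.get? "L" = none := by decide
              by_cases h90 : units = 90
              · subst h90
                simp [move_ship_part_2, move_ship_part_2_alt, hax2, bLeftTurns,
                  PySem.Dict.get?_mk_cons, aGet, bGet]
              · by_cases h270 : units = 270
                · subst h270
                  simp [move_ship_part_2, move_ship_part_2_alt, hax2, bLeftTurns,
                    PySem.Dict.get?_mk_cons, aGet, bGet, h90]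
                · by_cases h180 : units = 180
                  · subst h180
                    obtain ⟨hwN, hwE⟩ := hLR.resolve_left (by decide)
                    obtain ⟨wn, hwn⟩ := get?_of_contains_fst waypoint "N" hwN
                    obtain ⟨we, hwe⟩ := get?_of_contains_fst waypoint "E" hwE
                    have ha1 : aUpd (PySem.Dict.mk waypoint) "E" (fun v => -v)
                        = (PySem.Dict.mk waypoint).insert "E" (-we) := aUpd_of_get? _ hwe
                    have ha2 : aUpd ((PySem.Dict.mk waypoint).insert "E" (-we)) "N" (fun v => -v)
                        = ((PySem.Dict.mk waypoint).insert "E" (-we)).insert "N" (-wn) :=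
                      aUpd_of_get? _ (by
                        rw [PySem.Dict.get?_insert_of_ne _ _ (by decide : ("N":String) ≠ "E")]
                        exact hwn)
                    have hbe : bGet (PySem.Dict.mk waypoint) "E" = we :=
                      PySem.Dict.getD_of_get?_eq_some _ 0 hwe
                    have hbn : bGet (PySem.Dict.mk waypoint) "N" = wn :=
                      PySem.Dict.getD_of_get?_eq_some _ 0 hwn
                    simp [move_ship_part_2, move_ship_part_2_alt, hax2, bLeftTurns,
                      PySem.Dict.get?_mk_cons, ha1, ha2, hbe, hbn, h90, h270]
                  · have hlt : bLeftTurns.get? units = none := by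
                      simp [bLeftTurns, PySem.Dict.get?_mk_cons, PySem.Dict.get?, Ne.symm h90, Ne.symm h180,
                        Ne.symm h270]
                    simp [move_ship_part_2, move_ship_part_2_alt, hax2, hlt, h90, h180, h270]
            · by_cases hRa : action = "R"
              · subst hRa
                have hax2 : bAxis.get? "R" = none := by decide
                by_cases h90 : units = 90
                · subst h90
                  simp [move_ship_part_2, move_ship_part_2_alt, hax2, bLeftTurns,
                    PySem.Dict.get?_mk_cons, aGet, bGet]
                · by_cases h270 : units = 270
                  · subst h270
                    simp [move_ship_part_2, move_ship_part_2_alt, hax2, bLeftTurns,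
                      PySem.Dict.get?_mk_cons, aGet, bGet, h90]
                  · by_cases h180 : units = 180
                    · subst h180
                      obtain ⟨hwN, hwE⟩ := hLR.resolve_left (by decide)
                      obtain ⟨wn, hwn⟩ := get?_of_contains_fst waypoint "N" hwN
                      obtain ⟨we, hwe⟩ := get?_of_contains_fst waypoint "E" hwE
                      have ha1 : aUpd (PySem.Dict.mk waypoint) "E" (fun v => -v)
                          = (PySem.Dict.mk waypoint).insert "E" (-we) := aUpd_of_get? _ hwe
                      have ha2 : aUpd ((PySem.Dict.mk waypoint).insert "E" (-we)) "N" (fun v => -v)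
                          = ((PySem.Dict.mk waypoint).insert "E" (-we)).insert "N" (-wn) :=
                        aUpd_of_get? _ (by
                          rw [PySem.Dict.get?_insert_of_ne _ _ (by decide : ("N":String) ≠ "E")]
                          exact hwn)
                      have hbe : bGet (PySem.Dict.mk waypoint) "E" = we :=
                        PySem.Dict.getD_of_get?_eq_some _ 0 hwe
                      have hbn : bGet (PySem.Dict.mk waypoint) "N" = wn :=
                        PySem.Dict.getD_of_get?_eq_some _ 0 hwn
                      simp [move_ship_part_2, move_ship_part_2_alt, hax2, bLeftTurns,
                        PySem.Dict.get?_mk_cons, ha1, ha2, hbe, hbn, h90, h270]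
                    · have hlt : bLeftTurns.get? units = none := by
                        simp [bLeftTurns, PySem.Dict.get?_mk_cons, PySem.Dict.get?, Ne.symm h90, Ne.symm h180,
                          Ne.symm h270]
                      simp [move_ship_part_2, move_ship_part_2_alt, hax2, hlt, h90, h180, h270]
              · have haxd : bAxis.get? action = none := by
                  simp [bAxis, PySem.Dict.get?_mk_cons, PySem.Dict.get?, Ne.symm hNa,
                    Ne.symm hSa, Ne.symm hEa, Ne.symm hWa]
                simp [move_ship_part_2, move_ship_part_2_alt, haxd, hNa, hSa, hEa, hWa,
                  hFa, hLa, hRa]
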